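-- pv_equiv track=rewrite | github.com/Vaishakh-SM/CS563-Lab | Assignment 1/hmm.py | calc_transition
-- ===== SOURCE A (Python) =====
-- def calc_transition(data):
--     '''
--     Calculates the transition counts between each tag.
--     Takes in data as input, data is expected to be a list of lists where each
--     item of the inner list has 2 elements sentence and tags.
--
--     Returns a dictionary of transition counts of each tag to another
--
--     To change the transition probability to trigram we have to consider
--     transition from (state(i-2),state(i-1)) to state(i) rather than state(i-1) to state(i)
--     '''
--     transition_count = {}
--
--     for item in data:
--         tag_list = item[1]
--         for cnt, tag in enumerate(tag_list[:-1]):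
--
--             if tag not in transition_count:
--                 transition_count[tag] = {}
--
--             next_tag = tag_list[cnt + 1]
--
--             if next_tag in transition_count[tag]:
--                 transition_count[tag][next_tag] += 1
--             else:
--                 transition_count[tag][next_tag] = 1
--
--     return transition_count
-- ===== SOURCE B (Python) =====
-- def calc_transition(data):
--     # One pass: flat counter keyed by (prev, next) pairs, then reshape into the nested dict.
--     flat = {}
--     for item in data:
--         tags = item[1]
--         for pair in zip(tags, tags[1:]):
--             flat[pair] = flat.get(pair, 0) + 1
--     result = {}
--     for (prev, nxt), c in flat.items():
--         result.setdefault(prev, {})[nxt] = c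
--     return result
-- ===== Notes on version B (the rewrite author's own statement) =====
-- stated objective: alternative
-- what changed: Instead of incrementally maintaining the nested dict-of-dicts while scanning, B first builds a flat counter keyed by (prev, next) pairs in one pass, then reshapes that flat table into the nested dict in a second pass over its items.
import Mathlib
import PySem

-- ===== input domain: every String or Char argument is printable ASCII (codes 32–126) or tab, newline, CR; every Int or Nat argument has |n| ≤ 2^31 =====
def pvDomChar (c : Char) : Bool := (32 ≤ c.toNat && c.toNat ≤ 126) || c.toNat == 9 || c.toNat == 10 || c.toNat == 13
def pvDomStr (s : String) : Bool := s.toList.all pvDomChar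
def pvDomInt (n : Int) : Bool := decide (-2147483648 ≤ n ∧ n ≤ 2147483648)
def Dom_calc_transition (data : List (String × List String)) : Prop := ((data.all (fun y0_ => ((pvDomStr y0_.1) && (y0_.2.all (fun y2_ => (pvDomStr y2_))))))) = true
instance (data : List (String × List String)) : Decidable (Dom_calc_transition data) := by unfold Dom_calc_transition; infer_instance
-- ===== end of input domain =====

-- B builds a flat (prev, next)-pair counter in one pass and then reshapes it into the
-- nested transition dict, instead of A's incrementally maintained dict-of-dicts (alternative decomposition).


-- ===== PORT A =====
-- inner-loop body of A: (cnt, tag) ↦ update the nested dict; tag_list[cnt+1] is always in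
-- range here (cnt ranges over indices of tag_list[:-1]), so pyGetD with a dummy default is exact
def pvStepA (tag_list : List String) (tc : PySem.Dict String (PySem.Dict String Int))
    (p : Int × String) : PySem.Dict String (PySem.Dict String Int) :=
  let cnt := p.1
  let tag := p.2
  let tc := if tc.contains tag then tc else tc.insert tag PySem.Dict.empty
  let next_tag := PySem.List.pyGetD tag_list (cnt + 1) ""
  let inner := tc.getD tag PySem.Dict.empty
  if inner.contains next_tag then
    tc.insert tag (inner.insert next_tag (inner.getD next_tag 0 + 1))
  else
    tc.insert tag (inner.insert next_tag 1)

def calc_transition (data : List (String × List String)) : List (String × List (String × Int)) :=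
  let transition_count : PySem.Dict String (PySem.Dict String Int) :=
    data.foldl (fun tc item =>
      (PySem.List.enumerate (PySem.List.slice item.2 none (some (-1))) 0).foldl
        (pvStepA item.2) tc)
      PySem.Dict.empty
  transition_count.items.map (fun kv => (kv.1, kv.2.items))

-- ===== PORT B =====
-- flat[pair] = flat.get(pair, 0) + 1
def pvFlatStep (f : PySem.Dict (String × String) Int) (p : String × String) :
    PySem.Dict (String × String) Int :=
  f.insert p (f.getD p 0 + 1)

-- result.setdefault(prev, {})[nxt] = c
def pvReStep (r : PySem.Dict String (PySem.Dict String Int))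
    (q : (String × String) × Int) : PySem.Dict String (PySem.Dict String Int) :=
  let r1 := r.setdefault q.1.1 PySem.Dict.empty
  r1.insert q.1.1 ((r1.getD q.1.1 PySem.Dict.empty).insert q.1.2 q.2)

def calc_transition_alt (data : List (String × List String)) : List (String × List (String × Int)) :=
  let flat : PySem.Dict (String × String) Int :=
    data.foldl (fun f item =>
      (item.2.zip (PySem.List.slice item.2 (some 1) none)).foldl pvFlatStep f)
      PySem.Dict.empty
  let result : PySem.Dict String (PySem.Dict String Int) :=
    flat.items.foldl pvReStep PySem.Dict.empty
  result.items.map (fun kv => (kv.1, kv.2.items))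

-- ===== PRECONDITION & SPEC =====
def Spec_calc_transition (data : List (String × List String)) (out : List (String × List (String × Int))) : Prop := out = calc_transition_alt data
instance (data : List (String × List String)) (out : List (String × List (String × Int))) : Decidable (Spec_calc_transition data out) := by unfold Spec_calc_transition; infer_instance

-- ===== CLAIM (what is proved, stated in full; the proofs are below) =====
def Claim_equal_calc_transition : Prop := ∀ (data : List (String × List String)), Dom_calc_transition data → Spec_calc_transition data (calc_transition data)

-- ===== LEMMAS AND PROOFS =====

-- the flat stream of adjacent tag pairs both programs process
def pvPairs (data : List (String × List String)) : List (String × String) :=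
  data.flatMap (fun item => item.2.zip item.2.tail)

-- closed form of A's inner step on a (prev, next) pair
def pvNestStep (tc : PySem.Dict String (PySem.Dict String Int)) (p : String × String) :
    PySem.Dict String (PySem.Dict String Int) :=
  tc.insert p.1 ((tc.getD p.1 PySem.Dict.empty).insert p.2
    ((tc.getD p.1 PySem.Dict.empty).getD p.2 0 + 1))

-- closed form of B's reshape step
def pvGroupStep (r : PySem.Dict String (PySem.Dict String Int))
    (q : (String × String) × Int) : PySem.Dict String (PySem.Dict String Int) :=
  r.insert q.1.1 ((r.getD q.1.1 PySem.Dict.empty).insert q.1.2 q.2)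

-- the inner dict both sides build for a given prev-tag, as an item list
def pvInnerSpec (ps : List (String × String)) (a : String) : List (String × Int) :=
  (PySem.Set.ofList ((ps.filter (fun p => p.1 == a)).map Prod.snd)).map
    (fun b => (b, (ps.count (a, b) : Int)))

theorem pvStepA_eq (tl : List String) (tc : PySem.Dict String (PySem.Dict String Int))
    (q : Int × String) :
    pvStepA tl tc q = pvNestStep tc (q.2, PySem.List.pyGetD tl (q.1 + 1) "") := by
  unfold pvStepA pvNestStep
  by_cases h : tc.contains q.2
  · simp only [h, if_true]
    by_cases h2 : (tc.getD q.2 PySem.Dict.empty).contains (PySem.List.pyGetD tl (q.1 + 1) "")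
    · simp [h2]
    · have h2' : (tc.getD q.2 PySem.Dict.empty).contains (PySem.List.pyGetD tl (q.1 + 1) "") = false := by
        simpa using h2
      rw [if_neg (by simp [h2']), PySem.Dict.getD_of_not_contains _ _ h2']
      norm_num
  · have h' : tc.contains q.2 = false := by simpa using h
    simp only [h', Bool.false_eq_true, if_false, PySem.Dict.getD_insert_self]
    simp only [PySem.Dict.contains_empty, Bool.false_eq_true, if_false,
      PySem.Dict.getD_of_not_contains _ _ h', PySem.Dict.getD_empty, zero_add,
      PySem.Dict.insert_insert_self]

theorem pvReStep_eq (r : PySem.Dict String (PySem.Dict String Int))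
    (q : (String × String) × Int) : pvReStep r q = pvGroupStep r q := by
  unfold pvReStep pvGroupStep
  by_cases h : r.contains q.1.1
  · rw [PySem.Dict.setdefault_of_contains _ _ h]
  · have h' : r.contains q.1.1 = false := by simpa using h
    rw [PySem.Dict.setdefault_of_not_contains _ _ h']
    show (r.insert q.1.1 PySem.Dict.empty).insert q.1.1 _ = _
    rw [PySem.Dict.getD_insert_self,
      PySem.Dict.insert_insert_self, PySem.Dict.getD_of_not_contains _ _ h']

theorem pvEnum_zip (tags : List String) :
    (PySem.List.enumerate tags.dropLast 0).map
      (fun p => (p.2, PySem.List.pyGetD tags (p.1 + 1) "")) = tags.zip tags.tail := by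
  apply List.ext_getElem
  · simp [PySem.List.length_enumerate, List.length_dropLast, List.length_zip, List.length_tail]
  · intro i h1 h2
    have hi : i < tags.dropLast.length := by
      simpa [PySem.List.length_enumerate] using (by simpa using h1 : i < (PySem.List.enumerate tags.dropLast 0).length)
    have hlen : i + 1 < tags.length := by
      simp [List.length_dropLast] at hi; omega
    rw [List.getElem_map, PySem.List.getElem_enumerate _ _ _ (by simpa [PySem.List.length_enumerate] using hi)]
    rw [List.getElem_zip]
    have : PySem.List.pyGetD tags ((i : Int) + 1) "" = tags[i + 1] := by
      have : (i : Int) + 1 = ((i + 1 : Nat) : Int) := by push_cast; ring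
      rw [this, PySem.List.pyGetD_natCast, List.getD_eq_getElem?_getD, List.getElem?_eq_getElem hlen]
      rfl
    simp only [zero_add, this, List.getElem_dropLast, List.getElem_tail]

theorem pvSet_ofList_append {α : Type} [BEq α] (xs : List α) (x : α) :
    PySem.Set.ofList (xs ++ [x]) = (PySem.Set.ofList xs).add x := by
  rw [PySem.Set.ofList_eq_foldl, PySem.Set.ofList_eq_foldl, List.foldl_append]
  rfl

-- dedup commutes with map: set(map f (set l)) = set(map f l)
theorem pvSet_ofList_map_ofList {α β : Type} [BEq α] [LawfulBEq α] [BEq β] [LawfulBEq β]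
    (l : List α) (f : α → β) :
    PySem.Set.ofList ((PySem.Set.ofList l).map f) = PySem.Set.ofList (l.map f) := by
  induction l using List.reverseRecOn with
  | nil => rfl
  | append_singleton xs x ih =>
      rw [pvSet_ofList_append, List.map_append]
      by_cases hx : x ∈ xs
      · rw [PySem.Set.add_of_mem ((PySem.Set.mem_ofList _ _).mpr hx), ih,
          show List.map f [x] = [f x] from rfl, pvSet_ofList_append,
          PySem.Set.add_of_mem ((PySem.Set.mem_ofList _ _).mpr (List.mem_map_of_mem hx))]
      · rw [PySem.Set.add_of_not_mem (fun hm => hx ((PySem.Set.mem_ofList _ _).mp hm)),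
          List.map_append, show List.map f [x] = [f x] from rfl,
          pvSet_ofList_append, pvSet_ofList_append, ih]

-- dedup commutes with filter
theorem pvSet_ofList_filter {α : Type} [BEq α] [LawfulBEq α] (l : List α) (p : α → Bool) :
    (PySem.Set.ofList l).filter p = PySem.Set.ofList (l.filter p) := by
  induction l using List.reverseRecOn with
  | nil => rfl
  | append_singleton xs x ih =>
      rw [pvSet_ofList_append, List.filter_append]
      by_cases hx : x ∈ xs
      · rw [PySem.Set.add_of_mem ((PySem.Set.mem_ofList _ _).mpr hx), ih]
        by_cases hp : p x
        · rw [show List.filter p [x] = [x] from by simp [hp], pvSet_ofList_append,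
            PySem.Set.add_of_mem]
          rw [PySem.Set.mem_ofList, List.mem_filter]
          exact ⟨hx, hp⟩
        · rw [show List.filter p [x] = [] from by simp [hp], List.append_nil]
      · rw [PySem.Set.add_of_not_mem (fun hm => hx ((PySem.Set.mem_ofList _ _).mp hm)),
          List.filter_append, ih]
        by_cases hp : p x
        · rw [show List.filter p [x] = [x] from by simp [hp], pvSet_ofList_append,
            PySem.Set.add_of_not_mem (fun hm =>
              hx (List.mem_of_mem_filter ((PySem.Set.mem_ofList _ _).mp hm)))]
        · rw [show List.filter p [x] = [] from by simp [hp], List.append_nil,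
            List.append_nil]

-- dedup commutes with an injective-on-the-list map
theorem pvSet_ofList_map_inj {α β : Type} [BEq α] [LawfulBEq α] [BEq β] [LawfulBEq β]
    (l : List α) (f : α → β) (hinj : ∀ x ∈ l, ∀ y ∈ l, f x = f y → x = y) :
    (PySem.Set.ofList l).map f = PySem.Set.ofList (l.map f) := by
  induction l using List.reverseRecOn with
  | nil => rfl
  | append_singleton xs x ih =>
      have hinj' : ∀ a ∈ xs, ∀ b ∈ xs, f a = f b → a = b := fun a ha b hb =>
        hinj a (by simp [ha]) b (by simp [hb])
      rw [pvSet_ofList_append, List.map_append, show List.map f [x] = [f x] from rfl,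
        pvSet_ofList_append]
      by_cases hx : x ∈ xs
      · rw [PySem.Set.add_of_mem ((PySem.Set.mem_ofList _ _).mpr hx), ih hinj',
          PySem.Set.add_of_mem ((PySem.Set.mem_ofList _ _).mpr (List.mem_map_of_mem hx))]
      · have hnm : f x ∉ PySem.Set.ofList (List.map f xs) := by
          intro hm
          obtain ⟨y, hy, hyx⟩ := List.mem_map.mp ((PySem.Set.mem_ofList _ _).mp hm)
          exact hx (hinj y (by simp [hy]) x (by simp) hyx ▸ hy)
        rw [PySem.Set.add_of_not_mem (fun hm => hx ((PySem.Set.mem_ofList _ _).mp hm)),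
          List.map_append, ih hinj', PySem.Set.add_of_not_mem hnm]
        rfl

theorem pvNestA_inv (ps : List (String × String)) :
    (ps.foldl pvNestStep PySem.Dict.empty).keys = PySem.Set.ofList (ps.map Prod.fst) ∧
    ∀ a, ((ps.foldl pvNestStep PySem.Dict.empty).getD a PySem.Dict.empty).items
      = pvInnerSpec ps a := by
  induction ps using List.reverseRecOn with
  | nil =>
      constructor
      · simp [PySem.Dict.keys_empty, PySem.Set.ofList]
      · intro a
        rfl
  | append_singleton l p ih =>
      obtain ⟨ihk, ihi⟩ := ih
      rw [List.foldl_append]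
      set N := l.foldl pvNestStep PySem.Dict.empty with hN
      obtain ⟨a, b⟩ := p
      set inner := N.getD a PySem.Dict.empty with hinner
      have hstep : pvNestStep N (a, b) = N.insert a (inner.insert b (inner.getD b 0 + 1)) := rfl
      rw [List.foldl_cons, List.foldl_nil, hstep]
      -- the inner dict's key list
      set S := PySem.Set.ofList ((l.filter (fun p => p.1 == a)).map Prod.snd) with hS
      have hinneritems : inner.items = pvInnerSpec l a := ihi a
      have hkeysinner : inner.keys = S := by
        show inner.items.map Prod.fst = S
        rw [hinneritems, pvInnerSpec, List.map_map]
        exact List.map_id _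
      have hndinner : inner.keys.Nodup := by rw [hkeysinner]; exact PySem.Set.nodup_ofList _
      have hmapsnoc : (l ++ [(a, b)]).map Prod.fst = l.map Prod.fst ++ [a] := by simp
      constructor
      · -- keys
        rw [hmapsnoc, pvSet_ofList_append, ← ihk]
        by_cases hc : N.contains a
        · rw [PySem.Dict.keys_insert_of_contains _ _ hc,
            PySem.Set.add_of_mem ((PySem.Dict.contains_iff_mem_keys _ _).mp hc)]
        · have hc' : N.contains a = false := by simpa using hc
          rw [PySem.Dict.keys_insert_of_not_contains _ _ hc',
            PySem.Set.add_of_not_mem (fun hmem => by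
              exact hc ((PySem.Dict.contains_iff_mem_keys _ _).mpr hmem))]
      · -- inner dicts
        intro a'
        by_cases ha : a' = a
        · subst ha
          rw [PySem.Dict.getD_insert_self]
          have hfilter : ((l ++ [(a', b)]).filter (fun p => p.1 == a')).map Prod.snd
              = (l.filter (fun p => p.1 == a')).map Prod.snd ++ [b] := by
            simp [List.filter_append]
          by_cases hb : b ∈ S
          · -- existing next-tag: in-place overwrite on both sides
            have hcb : inner.contains b = true :=
              (PySem.Dict.contains_iff_mem_keys _ _).mpr (hkeysinner ▸ hb)
            have hmem : (b, (l.count (a', b) : Int)) ∈ inner.items := by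
              rw [hinneritems, pvInnerSpec]
              exact List.mem_map_of_mem hb
            have hgetb : inner.getD b 0 = (l.count (a', b) : Int) :=
              PySem.Dict.getD_of_mem_items _ hmem hndinner 0
            rw [PySem.Dict.items_insert_of_contains _ _ hcb, hinneritems, pvInnerSpec,
              List.map_map, pvInnerSpec, hfilter, pvSet_ofList_append,
              PySem.Set.add_of_mem hb, ← hS, hgetb]
            apply List.map_congr_left
            intro b' hb'
            by_cases hbb : b' = b
            · subst hbb
              simp [List.count_append]
            · simp [Function.comp, hbb, List.count_append, Ne.symm hbb]
          · -- fresh next-tag: both sides append (b, 1)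
            have hcb : inner.contains b = false := by
              by_contra hne
              have hct : inner.contains b = true := by simpa using hne
              exact hb (hkeysinner ▸ (PySem.Dict.contains_iff_mem_keys _ _).mp hct)
            have hcnt0 : l.count (a', b) = 0 := by
              rw [List.count_eq_zero]
              intro hm
              exact hb (by
                rw [hS, PySem.Set.mem_ofList]
                exact List.mem_map_of_mem (List.mem_filter.mpr ⟨hm, by simp⟩))
            rw [PySem.Dict.items_insert_of_not_contains _ _ hcb,
              PySem.Dict.getD_of_not_contains _ _ hcb, hinneritems, pvInnerSpec,
              pvInnerSpec, hfilter, pvSet_ofList_append, PySem.Set.add_of_not_mem hb, ← hS,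
              List.map_append]
            congr 1
            · apply List.map_congr_left
              intro b' hb'
              have hne : b ≠ b' := fun h => hb (h ▸ hb')
              simp [List.count_append, hne]
            · simp [List.count_append, hcnt0]
        · -- other prev-tags untouched
          rw [PySem.Dict.getD_insert, if_neg ha, ihi a', pvInnerSpec, pvInnerSpec]
          have hfilter : (l ++ [(a, b)]).filter (fun p => p.1 == a')
              = l.filter (fun p => p.1 == a') := by
            simp [List.filter_append, Ne.symm ha]
          rw [hfilter]
          apply List.map_congr_left
          intro b' _
          have hpb : ((a, b) == (a', b')) = false := by simp [Ne.symm ha]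
          simp [List.count_append, List.count_singleton, hpb]

theorem pvGroupB_inv (L : List ((String × String) × Int))
    (hnd : (L.map Prod.fst).Nodup) :
    (L.foldl pvGroupStep PySem.Dict.empty).keys
        = PySem.Set.ofList (L.map (fun q => q.1.1)) ∧
    ∀ a, ((L.foldl pvGroupStep PySem.Dict.empty).getD a PySem.Dict.empty).items
        = (L.filter (fun q => q.1.1 == a)).map (fun q => (q.1.2, q.2)) := by
  induction L using List.reverseRecOn with
  | nil =>
      constructor
      · simp [PySem.Dict.keys_empty, PySem.Set.ofList]
      · intro a; rfl
  | append_singleton l q ih =>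
      rw [List.map_append] at hnd
      have hndl : (l.map Prod.fst).Nodup := hnd.sublist (List.sublist_append_left _ _)
      have hfresh : q.1 ∉ l.map Prod.fst := by
        have h2 := List.nodup_append.mp hnd
        intro hm
        exact h2.2.2 q.1 hm q.1 (by simp) rfl
      obtain ⟨ihk, ihi⟩ := ih hndl
      rw [List.foldl_append, List.foldl_cons, List.foldl_nil]
      set R := l.foldl pvGroupStep PySem.Dict.empty with hR
      obtain ⟨⟨a, b⟩, c⟩ := q
      show ((pvGroupStep R ((a, b), c)).keys = _) ∧ _
      rw [show pvGroupStep R ((a, b), c)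
            = R.insert a ((R.getD a PySem.Dict.empty).insert b c) from rfl]
      set inner := R.getD a PySem.Dict.empty with hinner
      constructor
      · rw [show (l ++ [((a, b), c)]).map (fun q => q.1.1)
              = l.map (fun q => q.1.1) ++ [a] from by simp,
          pvSet_ofList_append, ← ihk]
        by_cases hc : R.contains a
        · rw [PySem.Dict.keys_insert_of_contains _ _ hc,
            PySem.Set.add_of_mem ((PySem.Dict.contains_iff_mem_keys _ _).mp hc)]
        · have hc' : R.contains a = false := by simpa using hc
          rw [PySem.Dict.keys_insert_of_not_contains _ _ hc',
            PySem.Set.add_of_not_mem (fun hm =>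
              hc ((PySem.Dict.contains_iff_mem_keys _ _).mpr hm))]
      · intro a'
        by_cases ha : a' = a
        · subst ha
          rw [PySem.Dict.getD_insert_self]
          have hcb : inner.contains b = false := by
            by_contra hne
            have hct : inner.contains b = true := by simpa using hne
            have hbmem : b ∈ inner.keys := (PySem.Dict.contains_iff_mem_keys _ _).mp hct
            have : b ∈ inner.items.map Prod.fst := hbmem
            rw [ihi a'] at this
            rw [List.map_map] at this
            obtain ⟨⟨⟨x, y⟩, v⟩, hq', hqy⟩ := List.mem_map.mp this
            have hq'a : x = a' := by
              have := (List.mem_filter.mp hq').2; simpa using this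
            have hq'b : y = b := by simpa using hqy
            apply hfresh
            subst hq'a; subst hq'b
            exact List.mem_map_of_mem (f := Prod.fst) (a := ((x, y), v)) (List.mem_filter.mp hq').1
          rw [PySem.Dict.items_insert_of_not_contains _ _ hcb, ihi a']
          rw [List.filter_append, List.map_append]
          simp
        · rw [PySem.Dict.getD_insert, if_neg ha, ihi a']
          have hfilter : (l ++ [((a, b), c)]).filter (fun q => q.1.1 == a')
              = l.filter (fun q => q.1.1 == a') := by
            simp [List.filter_append, Ne.symm ha]
          rw [hfilter]

theorem pvCalcA_eq (data : List (String × List String)) :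
    calc_transition data
      = ((pvPairs data).foldl pvNestStep PySem.Dict.empty).items.map
          (fun kv => (kv.1, kv.2.items)) := by
  show ((data.foldl (fun tc item =>
      (PySem.List.enumerate (PySem.List.slice item.2 none (some (-1))) 0).foldl
        (pvStepA item.2) tc) PySem.Dict.empty).items.map (fun kv => (kv.1, kv.2.items))) = _
  have hinner : ∀ (tc : PySem.Dict String (PySem.Dict String Int)) (tl : List String),
      (PySem.List.enumerate (PySem.List.slice tl none (some (-1))) 0).foldl (pvStepA tl) tc
        = (tl.zip tl.tail).foldl pvNestStep tc := by
    intro tc tl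
    rw [PySem.List.slice_to_neg_one,
      show pvStepA tl = fun tc q => pvNestStep tc (q.2, PySem.List.pyGetD tl (q.1 + 1) "")
        from funext fun tc => funext fun q => pvStepA_eq tl tc q,
      ← List.foldl_map, pvEnum_zip]
  simp only [hinner]
  rw [← List.foldl_flatMap]
  rfl

theorem pvCalcB_eq (data : List (String × List String)) :
    calc_transition_alt data
      = ((PySem.Dict.counter (pvPairs data)).items.foldl pvGroupStep
          PySem.Dict.empty).items.map (fun kv => (kv.1, kv.2.items)) := by
  show (((data.foldl (fun f item =>
      (item.2.zip (PySem.List.slice item.2 (some 1) none)).foldl pvFlatStep f)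
      PySem.Dict.empty).items.foldl pvReStep PySem.Dict.empty).items.map
        (fun kv => (kv.1, kv.2.items))) = _
  simp only [PySem.List.slice_from_one]
  rw [← List.foldl_flatMap,
    show List.foldl pvFlatStep PySem.Dict.empty
        (data.flatMap fun item => item.2.zip item.2.tail)
      = PySem.Dict.counter (pvPairs data)
      from PySem.Dict.foldl_insert_getD_add_one_eq_counter _,
    show pvReStep = pvGroupStep from funext fun r => funext fun q => pvReStep_eq r q]

theorem pvB_inner (ps : List (String × String)) (a : String) :
    (((PySem.Dict.counter ps).items.foldl pvGroupStep PySem.Dict.empty).getD a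
        PySem.Dict.empty).items = pvInnerSpec ps a := by
  have hL : (PySem.Dict.counter ps).items
      = (PySem.Set.ofList ps).map (fun k => (k, (ps.count k : Int))) :=
    PySem.Dict.items_counter ps
  have hnd : ((PySem.Dict.counter ps).items.map Prod.fst).Nodup := by
    rw [hL, List.map_map,
      show (Prod.fst ∘ fun k : String × String => (k, (ps.count k : Int))) = id from rfl,
      List.map_id]
    exact PySem.Set.nodup_ofList ps
  obtain ⟨_, hbi⟩ := pvGroupB_inv _ hnd
  rw [hbi a, hL, List.filter_map, List.map_map,
    show ((fun q : (String × String) × Int => q.1.1 == a)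
        ∘ fun k : String × String => (k, (ps.count k : Int)))
      = (fun p : String × String => p.1 == a) from rfl,
    pvSet_ofList_filter]
  have hstep : ∀ k ∈ PySem.Set.ofList (ps.filter (fun p => p.1 == a)),
      ((fun q : (String × String) × Int => (q.1.2, q.2)) ∘ fun k => (k, (ps.count k : Int))) k
        = ((fun b => (b, (ps.count (a, b) : Int))) ∘ Prod.snd) k := by
    intro k hk
    have hk1 : k.1 = a := by
      have := (List.mem_filter.mp ((PySem.Set.mem_ofList _ _).mp hk)).2
      simpa using this
    obtain ⟨k1, k2⟩ := k
    simp only [Function.comp]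
    simp at hk1
    subst hk1
    rfl
  rw [List.map_congr_left hstep, ← List.map_map,
    pvSet_ofList_map_inj _ Prod.snd (fun x hx y hy hxy => by
      have hx1 : x.1 = a := by simpa using (List.mem_filter.mp hx).2
      have hy1 : y.1 = a := by simpa using (List.mem_filter.mp hy).2
      obtain ⟨x1, x2⟩ := x; obtain ⟨y1, y2⟩ := y
      simp_all)]
  rfl

-- ===== VERDICT (by name: the statement is the Claim_ definition above) =====
theorem calc_transition_spec : Claim_equal_calc_transition := by
  intro data _hdom
  unfold Spec_calc_transition
  rw [pvCalcA_eq, pvCalcB_eq]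
  set ps := pvPairs data with hps
  obtain ⟨hak, hai⟩ := pvNestA_inv ps
  have hndA : (ps.foldl pvNestStep PySem.Dict.empty).keys.Nodup := by
    rw [hak]; exact PySem.Set.nodup_ofList _
  have hL : (PySem.Dict.counter ps).items
      = (PySem.Set.ofList ps).map (fun k => (k, (ps.count k : Int))) :=
    PySem.Dict.items_counter ps
  have hnd : ((PySem.Dict.counter ps).items.map Prod.fst).Nodup := by
    rw [hL, List.map_map,
      show (Prod.fst ∘ fun k : String × String => (k, (ps.count k : Int))) = id from rfl,
      List.map_id]
    exact PySem.Set.nodup_ofList ps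
  obtain ⟨hbk, _⟩ := pvGroupB_inv _ hnd
  have hndB : ((PySem.Dict.counter ps).items.foldl pvGroupStep PySem.Dict.empty).keys.Nodup := by
    rw [hbk]; exact PySem.Set.nodup_ofList _
  rw [PySem.Dict.items_eq_map_keys _ hndA PySem.Dict.empty,
    PySem.Dict.items_eq_map_keys _ hndB PySem.Dict.empty, List.map_map, List.map_map]
  have hkeyeq : (ps.foldl pvNestStep PySem.Dict.empty).keys
      = ((PySem.Dict.counter ps).items.foldl pvGroupStep PySem.Dict.empty).keys := by
    rw [hak, hbk, hL, List.map_map,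
      show ((fun q : (String × String) × Int => q.1.1) ∘ fun k => (k, (ps.count k : Int)))
        = Prod.fst from rfl, pvSet_ofList_map_ofList]
  rw [← hkeyeq]
  apply List.map_congr_left
  intro a _
  simp only [Function.comp]
  rw [hai a, pvB_inner ps a]
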